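-- pv_equiv track=rewrite | github.com/BojanUSI/Python-Algorithms | Python Exercises/minimal_sum.py | minimal_sum
-- ===== SOURCE A (Python) =====
-- def minimal_sum(A, x):
--     total_sum = 0
--     for a in A:
--         if a >= x:
--             return True
--         if a > 0:
--             total_sum += a
--             if total_sum >= x:
--                 return True
--     return False
-- ===== SOURCE B (Python) =====
-- def minimal_sum(A, x):
--     # B: two independent passes — positive prefix sums are monotone, so a prefix
--     # reaches x iff the total of positives does (given at least one positive).
--     positives = [a for a in A if a > 0]
--     return any(a >= x for a in A) or (bool(positives) and sum(positives) >= x)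
-- ===== Notes on version B (the rewrite author's own statement) =====
-- stated objective: simpler
-- what changed: Replaces the interleaved early-exit loop carrying a running positive sum with two independent reductions (any element >= x; nonempty positives with total >= x), justified by the monotonicity of positive prefix sums.
import Mathlib
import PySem

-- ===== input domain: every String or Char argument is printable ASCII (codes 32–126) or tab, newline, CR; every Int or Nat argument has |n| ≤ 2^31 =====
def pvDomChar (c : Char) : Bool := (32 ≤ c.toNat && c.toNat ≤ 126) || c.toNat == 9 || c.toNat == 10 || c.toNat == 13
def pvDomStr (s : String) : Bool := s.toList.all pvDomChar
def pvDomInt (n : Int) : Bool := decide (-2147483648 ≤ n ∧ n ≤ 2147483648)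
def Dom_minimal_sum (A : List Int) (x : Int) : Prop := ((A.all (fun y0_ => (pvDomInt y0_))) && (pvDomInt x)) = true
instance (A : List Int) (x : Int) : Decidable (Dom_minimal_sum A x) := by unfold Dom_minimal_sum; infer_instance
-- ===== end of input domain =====

-- B replaces A's interleaved early-exit loop by two independent reductions
-- (any / filter+sum), exploiting monotonicity of positive prefix sums; same values everywhere.
-- ===== PORT A =====
def msLoop (x : Int) : List Int → Int → Bool
  | [], _ => false
  | a :: rest, total_sum =>
      if a ≥ x then true
      else if a > 0 then
        if total_sum + a ≥ x then true else msLoop x rest (total_sum + a)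
      else msLoop x rest total_sum

def minimal_sum (A : List Int) (x : Int) : Bool := msLoop x A 0

-- ===== PORT B =====
def minimal_sum_alt (A : List Int) (x : Int) : Bool :=
  let positives := A.filter (fun a => decide (a > 0))
  (A.any (fun a => decide (a ≥ x))) || (!positives.isEmpty && decide (positives.sum ≥ x))

-- ===== PRECONDITION & SPEC =====
def Spec_minimal_sum (A : List Int) (x : Int) (out : Bool) : Prop := out = minimal_sum_alt A x
instance (A : List Int) (x : Int) (out : Bool) : Decidable (Spec_minimal_sum A x out) := by unfold Spec_minimal_sum; infer_instance

-- ===== CLAIM (what is proved, stated in full; the proofs are below) =====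
def Claim_equal_minimal_sum : Prop := ∀ (A : List Int) (x : Int), Dom_minimal_sum A x → Spec_minimal_sum A x (minimal_sum A x)

-- ===== LEMMAS AND PROOFS =====

lemma positives_sum_nonneg (A : List Int) :
    0 ≤ (A.filter (fun a => decide (0 < a))).sum := by
  apply List.sum_nonneg
  intro a ha
  have h := List.of_mem_filter ha
  simp at h
  omega

lemma msLoop_eq (x : Int) (A : List Int) (s : Int) :
    msLoop x A s =
      ((A.any (fun a => decide (a ≥ x))) ||
        (!(A.filter (fun a => decide (a > 0))).isEmpty &&
          decide (s + (A.filter (fun a => decide (a > 0))).sum ≥ x))) := by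
  induction A generalizing s with
  | nil => simp [msLoop]
  | cons a rest ih =>
    by_cases hx : a ≥ x
    · simp [msLoop, hx]
    · by_cases hp : a > 0
      · have hcons : (a :: rest).filter (fun b => decide (0 < b)) =
            a :: rest.filter (fun b => decide (0 < b)) := by
          simp [hp]
        have hs := positives_sum_nonneg rest
        simp only [msLoop, if_neg hx, if_pos hp, hcons, List.any_cons, List.sum_cons,
          List.isEmpty_cons, Bool.not_false, Bool.true_and, decide_eq_false hx,
          Bool.false_or]
        rw [ih]
        by_cases h1 : s + a ≥ x
        · rw [if_pos h1]
          have h2 : x ≤ s + (a + (rest.filter (fun b => decide (0 < b))).sum) := by omega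
          rw [decide_eq_true h2, Bool.or_true]
        · rw [if_neg h1]
          by_cases hr : (rest.filter (fun b => decide (0 < b))).isEmpty
          · have hz : (rest.filter (fun b => decide (0 < b))).sum = 0 := by
              rw [List.isEmpty_iff] at hr; simp [hr]
            simp [hr, hz, h1]
          · have h3 : s + a + (rest.filter (fun b => decide (0 < b))).sum =
                s + (a + (rest.filter (fun b => decide (0 < b))).sum) := by ring
            simp [hr, h3]
      · have hcons : (a :: rest).filter (fun b => decide (0 < b)) =
            rest.filter (fun b => decide (0 < b)) := by
          simp [hp]
        simp [msLoop, hx, hp, ih, hcons]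

-- ===== VERDICT (by name: the statement is the Claim_ definition above) =====
theorem minimal_sum_spec : Claim_equal_minimal_sum := by
  intro A x _
  unfold Spec_minimal_sum minimal_sum minimal_sum_alt
  rw [msLoop_eq]
  simp
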